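-- pv_equiv track=rewrite | github.com/mathkiler/PSEC | scripts/global_commandes/fonctions.py | fomatage_carte_into_printable
-- ===== SOURCE A (Python) =====
-- def fomatage_carte_into_printable(carte) :
--     carte = carte.lower()
--     if "pc_" in carte :
--         carte = carte.replace("pc_", "peu courant - ")
--     to_replace = {"h_" : "héroïque - ", "c_" : "commun - ", "r_" : "rare - ", "e_" : "épique - "}
--     for rarete in to_replace :
--         if rarete in carte :
--             carte = carte.replace(rarete, to_replace[rarete])
--     return carte
-- ===== SOURCE B (Python) =====
-- def fomatage_carte_into_printable(carte):
--     carte = carte.lower()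
--     out = []
--     i, n = 0, len(carte)
--     while i < n:
--         if carte.startswith("pc_", i):
--             out.append("peu courant - "); i += 3
--         elif carte.startswith("h_", i):
--             out.append("héroïque - "); i += 2
--         elif carte.startswith("c_", i):
--             out.append("commun - "); i += 2
--         elif carte.startswith("r_", i):
--             out.append("rare - "); i += 2
--         elif carte.startswith("e_", i):
--             out.append("épique - "); i += 2
--         else:
--             out.append(carte[i]); i += 1
--     return "".join(out)
-- ===== Notes on version B (the rewrite author's own statement) =====
-- stated objective: alternative
-- what changed: Replaces A's five sequential full-string .replace passes (each preceded by a redundant membership scan) with a single left-to-right scan that tries the five rarity tokens at each position (pc_ before c_) and emits either the replacement text or the character, joining once at the end; it trades C-implemented str.replace passes for one explicit pass with no intermediate strings.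
import Mathlib
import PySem

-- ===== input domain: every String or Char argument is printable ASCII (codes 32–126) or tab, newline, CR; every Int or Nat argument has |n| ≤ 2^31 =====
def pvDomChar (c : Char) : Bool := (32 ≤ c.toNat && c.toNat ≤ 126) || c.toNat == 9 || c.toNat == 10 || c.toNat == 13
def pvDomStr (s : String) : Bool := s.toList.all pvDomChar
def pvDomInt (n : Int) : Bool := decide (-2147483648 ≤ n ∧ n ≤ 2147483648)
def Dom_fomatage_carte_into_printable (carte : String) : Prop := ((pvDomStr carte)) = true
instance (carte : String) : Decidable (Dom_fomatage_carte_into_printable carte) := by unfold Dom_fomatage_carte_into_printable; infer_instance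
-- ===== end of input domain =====

-- B replaces A's five sequential full-string .replace passes by one left-to-right scan; return value only, no side effects involved.

-- ===== PORT A =====
-- the body of A's for-loop over the dict: 'if rarete in carte: carte = carte.replace(rarete, to_replace[rarete])'
def pvStepA (c : String) (p : String × String) : String :=
  if PySem.Str.isIn p.1 c then PySem.Str.replace c p.1 p.2 else c

def fomatage_carte_into_printable (carte : String) : String :=
  let c0 := PySem.Str.lower carte
  let c1 := if PySem.Str.isIn "pc_" c0 then PySem.Str.replace c0 "pc_" "peu courant - " else c0
  [("h_", "héroïque - "), ("c_", "commun - "), ("r_", "rare - "), ("e_", "épique - ")].foldl pvStepA c1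

-- ===== PORT B =====
-- replacement texts of Source B
def pvP : List Char := "peu courant - ".toList
def pvH : List Char := "héroïque - ".toList
def pvC : List Char := "commun - ".toList
def pvR : List Char := "rare - ".toList
def pvE : List Char := "épique - ".toList

-- Source B's while-loop: at each position try the five tokens in order (startswith = isPrefixOf), else copy the char
def pvScanB : List Char → List Char
  | [] => []
  | c :: t =>
    if ['p', 'c', '_'].isPrefixOf (c :: t) then pvP ++ pvScanB (t.drop 2)
    else if ['h', '_'].isPrefixOf (c :: t) then pvH ++ pvScanB (t.drop 1)
    else if ['c', '_'].isPrefixOf (c :: t) then pvC ++ pvScanB (t.drop 1)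
    else if ['r', '_'].isPrefixOf (c :: t) then pvR ++ pvScanB (t.drop 1)
    else if ['e', '_'].isPrefixOf (c :: t) then pvE ++ pvScanB (t.drop 1)
    else c :: pvScanB t
termination_by l => l.length
decreasing_by all_goals (simp [List.length_drop]; try omega)

def fomatage_carte_into_printable_alt (carte : String) : String :=
  String.ofList (pvScanB (PySem.Str.lower carte).toList)

-- ===== PRECONDITION & SPEC =====
def Spec_fomatage_carte_into_printable (carte : String) (out : String) : Prop := out = fomatage_carte_into_printable_alt carte
instance (carte : String) (out : String) : Decidable (Spec_fomatage_carte_into_printable carte out) := by unfold Spec_fomatage_carte_into_printable; infer_instance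

-- ===== CLAIM (what is proved, stated in full; the proofs are below) =====
def Claim_equal_fomatage_carte_into_printable : Prop := ∀ (carte : String), Dom_fomatage_carte_into_printable carte → Spec_fomatage_carte_into_printable carte (fomatage_carte_into_printable carte)

-- ===== LEMMAS AND PROOFS =====

-- str.replace for a nonempty pattern, as a structural recursion (leftmost, non-overlapping)
def pvRep (o : Char) (old' new : List Char) : List Char → List Char
  | [] => []
  | c :: t =>
    if (o :: old').isPrefixOf (c :: t) then new ++ pvRep o old' new (t.drop old'.length)
    else c :: pvRep o old' new t
termination_by l => l.length
decreasing_by all_goals (simp [List.length_drop]; try omega)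

theorem pvGo_spec (o : Char) (old' new : List Char) :
    ∀ (fuel : Nat) (l acc : List Char), l.length ≤ fuel →
      PySem.Chars.replace.go (o :: old') new fuel l acc = acc.reverse ++ pvRep o old' new l := by
  intro fuel
  induction fuel with
  | zero =>
    intro l acc h
    have : l = [] := List.eq_nil_of_length_eq_zero (Nat.le_zero.mp h)
    subst this
    simp [PySem.Chars.replace.go, pvRep]
  | succ n ih =>
    intro l acc h
    cases l with
    | nil => simp [PySem.Chars.replace.go, pvRep]
    | cons c t =>
      rw [PySem.Chars.replace.go]
      by_cases hp : (o :: old').isPrefixOf (c :: t) = true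
      · simp only [hp, if_true]
        rw [show List.drop (o :: old').length (c :: t) = t.drop old'.length by simp]
        rw [ih (t.drop old'.length) (new.reverse ++ acc) (by simp at h ⊢; omega)]
        simp [pvRep, hp]
      · simp only [hp]
        rw [ih t (c :: acc) (by simp at h; omega)]
        simp [pvRep, hp]

theorem pvReplace_eq (o : Char) (old' new s : List Char) :
    PySem.Chars.replace s (o :: old') new = pvRep o old' new s := by
  rw [PySem.Chars.replace]
  simp [pvGo_spec o old' new s.length s [] (le_refl _)]

theorem pvRep_of_not_infix (o : Char) (old' new : List Char) :
    ∀ s, ¬ (o :: old') <:+: s → pvRep o old' new s = s := by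
  intro s
  induction s with
  | nil => intro _; simp [pvRep]
  | cons c t ih =>
    intro h
    rw [pvRep]
    have hp : (o :: old').isPrefixOf (c :: t) ≠ true := by
      intro hp
      exact h (List.isPrefixOf_iff_prefix.mp hp).isInfix
    simp only [hp, if_false, Bool.false_eq_true]
    rw [ih (fun hi => h (hi.trans (List.suffix_cons c t).isInfix))]

-- heads: a replacement starting with a non-'_' char never creates a '_' at the front
theorem pvRep_head_ne (o : Char) (old' new : List Char) (x : Char) (hx : x ≠ '_')
    (hnew : new.head? = some x) :
    ∀ l, l.head? ≠ some '_' → (pvRep o old' new l).head? ≠ some '_' := by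
  intro l hl
  cases l with
  | nil => simp [pvRep]
  | cons c t =>
    rw [pvRep]
    by_cases hp : (o :: old').isPrefixOf (c :: t) = true
    · simp only [hp, if_true]
      cases new with
      | nil => simp at hnew
      | cons y ys =>
        simp at hnew ⊢
        simp [hnew] at hx ⊢
        exact hx
    · simpa [hp] using hl

-- pass a clean literal prefix (no '_', last char not the token letter) through a 2-char replacement
theorem pvRep_append_clean (a : Char) (new : List Char) :
    ∀ (P : List Char), '_' ∉ P → (∀ h : P ≠ [], P.getLast h ≠ a) →
      ∀ x, pvRep a ['_'] new (P ++ x) = P ++ pvRep a ['_'] new x := by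
  intro P
  induction P with
  | nil => intro _ _ x; simp
  | cons c P' ih =>
    intro hu hl x
    have hnp : (a :: ['_']).isPrefixOf (c :: (P' ++ x)) ≠ true := by
      intro hp
      rcases List.isPrefixOf_iff_prefix.mp hp with ⟨u, hu'⟩
      simp at hu'
      obtain ⟨hca, hrest⟩ := hu'
      cases P' with
      | nil =>
        have := hl (by simp)
        simp [List.getLast] at this
        exact this hca.symm
      | cons d P'' =>
        have : d = '_' := by
          have := congrArg List.head? hrest
          simp at this
          exact this.symm
        exact hu (by simp [this])
    rw [List.cons_append, pvRep]
    simp only [hnp, if_false, Bool.false_eq_true]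
    rw [ih (fun h => hu (List.mem_cons_of_mem _ h))
        (fun h => by
          have := hl (by simp)
          rwa [List.getLast_cons h] at this)]
    simp

-- abbreviation for A's composed replacement chain at the list level
def pvChain (l : List Char) : List Char :=
  pvRep 'e' ['_'] pvE (pvRep 'r' ['_'] pvR (pvRep 'c' ['_'] pvC (pvRep 'h' ['_'] pvH (pvRep 'p' ['c', '_'] pvP l))))

theorem pref2_false (a c : Char) (t : List Char)
    (h : ¬ (a :: ['_']).isPrefixOf (c :: t) = true) : c ≠ a ∨ t.head? ≠ some '_' := by
  by_cases hc : c = a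
  · subst hc
    right
    intro hh
    apply h
    cases t with
    | nil => simp at hh
    | cons d t' =>
      simp at hh
      simp [List.isPrefixOf, hh]
  · exact Or.inl hc

theorem rep2_cons_skip (a : Char) (new : List Char) (c : Char) (X : List Char)
    (h : c ≠ a ∨ X.head? ≠ some '_') :
    pvRep a ['_'] new (c :: X) = c :: pvRep a ['_'] new X := by
  rw [pvRep]
  have hnp : (a :: ['_']).isPrefixOf (c :: X) ≠ true := by
    intro hp
    cases X with
    | nil => simp [List.isPrefixOf] at hp
    | cons x xs =>
      simp [List.isPrefixOf] at hp
      rcases h with h | h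
      · exact h hp.1.symm
      · simp only [List.head?_cons, ne_eq, Option.some.injEq] at h
        exact h hp.2.symm
  simp [hnp]

theorem rep2_cons_match (a : Char) (new X : List Char) :
    pvRep a ['_'] new (a :: '_' :: X) = new ++ pvRep a ['_'] new X := by
  rw [pvRep]
  simp [List.isPrefixOf]

theorem repPC_cons_skip (c : Char) (X : List Char)
    (h : ¬ ['p', 'c', '_'].isPrefixOf (c :: X) = true) :
    pvRep 'p' ['c', '_'] pvP (c :: X) = c :: pvRep 'p' ['c', '_'] pvP X := by
  rw [pvRep]
  simp [h]

theorem repPC_match (X : List Char) :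
    pvRep 'p' ['c', '_'] pvP ('p' :: 'c' :: '_' :: X) = pvP ++ pvRep 'p' ['c', '_'] pvP X := by
  rw [pvRep]
  simp [List.isPrefixOf]

theorem head_ne_rPC (X : List Char) (h : X.head? ≠ some '_') :
    (pvRep 'p' ['c', '_'] pvP X).head? ≠ some '_' :=
  pvRep_head_ne 'p' ['c', '_'] pvP 'p' (by decide) (by decide) X h

theorem head_ne_rH (X : List Char) (h : X.head? ≠ some '_') :
    (pvRep 'h' ['_'] pvH X).head? ≠ some '_' :=
  pvRep_head_ne 'h' ['_'] pvH 'h' (by decide) (by decide) X h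

theorem head_ne_rC (X : List Char) (h : X.head? ≠ some '_') :
    (pvRep 'c' ['_'] pvC X).head? ≠ some '_' :=
  pvRep_head_ne 'c' ['_'] pvC 'c' (by decide) (by decide) X h

theorem head_ne_rR (X : List Char) (h : X.head? ≠ some '_') :
    (pvRep 'r' ['_'] pvR X).head? ≠ some '_' :=
  pvRep_head_ne 'r' ['_'] pvR 'r' (by decide) (by decide) X h

theorem pvChain_eq : ∀ (n : Nat) (l : List Char), l.length ≤ n → pvChain l = pvScanB l := by
  intro n
  induction n with
  | zero =>
    intro l hl
    have : l = [] := List.eq_nil_of_length_eq_zero (Nat.le_zero.mp hl)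
    subst this
    simp [pvChain, pvRep, pvScanB]
  | succ n ih =>
    intro l hl
    cases l with
    | nil => simp [pvChain, pvRep, pvScanB]
    | cons c t =>
      by_cases h1 : ['p', 'c', '_'].isPrefixOf (c :: t) = true
      · rcases List.isPrefixOf_iff_prefix.mp h1 with ⟨u, hu⟩
        simp only [List.cons_append, List.nil_append] at hu
        obtain ⟨hc, ht⟩ := List.cons_eq_cons.mp hu
        subst hc; subst ht
        unfold pvChain
        rw [repPC_match u]
        rw [pvRep_append_clean 'h' pvH pvP (by decide) (by decide)]
        rw [pvRep_append_clean 'c' pvC pvP (by decide) (by decide)]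
        rw [pvRep_append_clean 'r' pvR pvP (by decide) (by decide)]
        rw [pvRep_append_clean 'e' pvE pvP (by decide) (by decide)]
        rw [show pvRep 'e' ['_'] pvE (pvRep 'r' ['_'] pvR (pvRep 'c' ['_'] pvC (pvRep 'h' ['_'] pvH (pvRep 'p' ['c', '_'] pvP u)))) = pvChain u from rfl]
        rw [ih u (by simp at hl; omega)]
        rw [pvScanB]
        simp [List.isPrefixOf]
      · by_cases h2 : ['h', '_'].isPrefixOf (c :: t) = true
        · rcases List.isPrefixOf_iff_prefix.mp h2 with ⟨u, hu⟩
          simp only [List.cons_append, List.nil_append] at hu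
          obtain ⟨hc, ht⟩ := List.cons_eq_cons.mp hu
          subst hc; subst ht
          unfold pvChain
          rw [repPC_cons_skip 'h' ('_' :: u) (by simp [List.isPrefixOf])]
          rw [repPC_cons_skip '_' u (by simp [List.isPrefixOf])]
          rw [rep2_cons_match 'h' pvH (pvRep 'p' ['c', '_'] pvP u)]
          rw [pvRep_append_clean 'c' pvC pvH (by decide) (by decide)]
          rw [pvRep_append_clean 'r' pvR pvH (by decide) (by decide)]
          rw [pvRep_append_clean 'e' pvE pvH (by decide) (by decide)]
          rw [show pvRep 'e' ['_'] pvE (pvRep 'r' ['_'] pvR (pvRep 'c' ['_'] pvC (pvRep 'h' ['_'] pvH (pvRep 'p' ['c', '_'] pvP u)))) = pvChain u from rfl]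
          rw [ih u (by simp at hl; omega)]
          rw [pvScanB]
          simp [List.isPrefixOf]
        · by_cases h3 : ['c', '_'].isPrefixOf (c :: t) = true
          · rcases List.isPrefixOf_iff_prefix.mp h3 with ⟨u, hu⟩
            simp only [List.cons_append, List.nil_append] at hu
            obtain ⟨hc, ht⟩ := List.cons_eq_cons.mp hu
            subst hc; subst ht
            unfold pvChain
            rw [repPC_cons_skip 'c' ('_' :: u) (by simp [List.isPrefixOf])]
            rw [repPC_cons_skip '_' u (by simp [List.isPrefixOf])]
            rw [rep2_cons_skip 'h' pvH 'c' ('_' :: pvRep 'p' ['c', '_'] pvP u) (Or.inl (by decide))]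
            rw [rep2_cons_skip 'h' pvH '_' (pvRep 'p' ['c', '_'] pvP u) (Or.inl (by decide))]
            rw [rep2_cons_match 'c' pvC (pvRep 'h' ['_'] pvH (pvRep 'p' ['c', '_'] pvP u))]
            rw [pvRep_append_clean 'r' pvR pvC (by decide) (by decide)]
            rw [pvRep_append_clean 'e' pvE pvC (by decide) (by decide)]
            rw [show pvRep 'e' ['_'] pvE (pvRep 'r' ['_'] pvR (pvRep 'c' ['_'] pvC (pvRep 'h' ['_'] pvH (pvRep 'p' ['c', '_'] pvP u)))) = pvChain u from rfl]
            rw [ih u (by simp at hl; omega)]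
            rw [pvScanB]
            simp [List.isPrefixOf]
          · by_cases h4 : ['r', '_'].isPrefixOf (c :: t) = true
            · rcases List.isPrefixOf_iff_prefix.mp h4 with ⟨u, hu⟩
              simp only [List.cons_append, List.nil_append] at hu
              obtain ⟨hc, ht⟩ := List.cons_eq_cons.mp hu
              subst hc; subst ht
              unfold pvChain
              rw [repPC_cons_skip 'r' ('_' :: u) (by simp [List.isPrefixOf])]
              rw [repPC_cons_skip '_' u (by simp [List.isPrefixOf])]
              rw [rep2_cons_skip 'h' pvH 'r' ('_' :: pvRep 'p' ['c', '_'] pvP u) (Or.inl (by decide))]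
              rw [rep2_cons_skip 'h' pvH '_' (pvRep 'p' ['c', '_'] pvP u) (Or.inl (by decide))]
              rw [rep2_cons_skip 'c' pvC 'r' ('_' :: pvRep 'h' ['_'] pvH (pvRep 'p' ['c', '_'] pvP u)) (Or.inl (by decide))]
              rw [rep2_cons_skip 'c' pvC '_' (pvRep 'h' ['_'] pvH (pvRep 'p' ['c', '_'] pvP u)) (Or.inl (by decide))]
              rw [rep2_cons_match 'r' pvR (pvRep 'c' ['_'] pvC (pvRep 'h' ['_'] pvH (pvRep 'p' ['c', '_'] pvP u)))]
              rw [pvRep_append_clean 'e' pvE pvR (by decide) (by decide)]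
              rw [show pvRep 'e' ['_'] pvE (pvRep 'r' ['_'] pvR (pvRep 'c' ['_'] pvC (pvRep 'h' ['_'] pvH (pvRep 'p' ['c', '_'] pvP u)))) = pvChain u from rfl]
              rw [ih u (by simp at hl; omega)]
              rw [pvScanB]
              simp [List.isPrefixOf]
            · by_cases h5 : ['e', '_'].isPrefixOf (c :: t) = true
              · rcases List.isPrefixOf_iff_prefix.mp h5 with ⟨u, hu⟩
                simp only [List.cons_append, List.nil_append] at hu
                obtain ⟨hc, ht⟩ := List.cons_eq_cons.mp hu
                subst hc; subst ht
                unfold pvChain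
                rw [repPC_cons_skip 'e' ('_' :: u) (by simp [List.isPrefixOf])]
                rw [repPC_cons_skip '_' u (by simp [List.isPrefixOf])]
                rw [rep2_cons_skip 'h' pvH 'e' ('_' :: pvRep 'p' ['c', '_'] pvP u) (Or.inl (by decide))]
                rw [rep2_cons_skip 'h' pvH '_' (pvRep 'p' ['c', '_'] pvP u) (Or.inl (by decide))]
                rw [rep2_cons_skip 'c' pvC 'e' ('_' :: pvRep 'h' ['_'] pvH (pvRep 'p' ['c', '_'] pvP u)) (Or.inl (by decide))]
                rw [rep2_cons_skip 'c' pvC '_' (pvRep 'h' ['_'] pvH (pvRep 'p' ['c', '_'] pvP u)) (Or.inl (by decide))]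
                rw [rep2_cons_skip 'r' pvR 'e' ('_' :: pvRep 'c' ['_'] pvC (pvRep 'h' ['_'] pvH (pvRep 'p' ['c', '_'] pvP u))) (Or.inl (by decide))]
                rw [rep2_cons_skip 'r' pvR '_' (pvRep 'c' ['_'] pvC (pvRep 'h' ['_'] pvH (pvRep 'p' ['c', '_'] pvP u))) (Or.inl (by decide))]
                rw [rep2_cons_match 'e' pvE (pvRep 'r' ['_'] pvR (pvRep 'c' ['_'] pvC (pvRep 'h' ['_'] pvH (pvRep 'p' ['c', '_'] pvP u))))]
                rw [show pvRep 'e' ['_'] pvE (pvRep 'r' ['_'] pvR (pvRep 'c' ['_'] pvC (pvRep 'h' ['_'] pvH (pvRep 'p' ['c', '_'] pvP u)))) = pvChain u from rfl]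
                rw [ih u (by simp at hl; omega)]
                rw [pvScanB]
                simp [List.isPrefixOf]
              · -- default: no token matches at this position
                have hht : c ≠ 'h' ∨ t.head? ≠ some '_' := pref2_false 'h' c t h2
                have hct : c ≠ 'c' ∨ t.head? ≠ some '_' := pref2_false 'c' c t h3
                have hrt : c ≠ 'r' ∨ t.head? ≠ some '_' := pref2_false 'r' c t h4
                have het : c ≠ 'e' ∨ t.head? ≠ some '_' := pref2_false 'e' c t h5
                unfold pvChain
                rw [repPC_cons_skip c t h1]
                rw [rep2_cons_skip 'h' pvH c (pvRep 'p' ['c', '_'] pvP t)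
                  (hht.imp id (fun h => head_ne_rPC t h))]
                rw [rep2_cons_skip 'c' pvC c (pvRep 'h' ['_'] pvH (pvRep 'p' ['c', '_'] pvP t))
                  (hct.imp id (fun h => head_ne_rH _ (head_ne_rPC t h)))]
                rw [rep2_cons_skip 'r' pvR c (pvRep 'c' ['_'] pvC (pvRep 'h' ['_'] pvH (pvRep 'p' ['c', '_'] pvP t)))
                  (hrt.imp id (fun h => head_ne_rC _ (head_ne_rH _ (head_ne_rPC t h))))]
                rw [rep2_cons_skip 'e' pvE c (pvRep 'r' ['_'] pvR (pvRep 'c' ['_'] pvC (pvRep 'h' ['_'] pvH (pvRep 'p' ['c', '_'] pvP t))))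
                  (het.imp id (fun h => head_ne_rR _ (head_ne_rC _ (head_ne_rH _ (head_ne_rPC t h)))))]
                rw [show pvRep 'e' ['_'] pvE (pvRep 'r' ['_'] pvR (pvRep 'c' ['_'] pvC (pvRep 'h' ['_'] pvH (pvRep 'p' ['c', '_'] pvP t)))) = pvChain t from rfl]
                rw [ih t (by simp at hl; omega)]
                rw [pvScanB]
                simp [h1, h2, h3, h4, h5]

theorem pvStr_guard (old new : String) (o : Char) (old' : List Char) (hol : old.toList = o :: old')
    (l : List Char) :
    (if PySem.Str.isIn old (String.ofList l) then PySem.Str.replace (String.ofList l) old new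
      else String.ofList l) = String.ofList (pvRep o old' new.toList l) := by
  by_cases h : PySem.Chars.isIn (o :: old') l = true
  · have hc : PySem.Str.isIn old (String.ofList l) = true := by
      simp [PySem.Str.isIn, hol, h]
    rw [if_pos hc]
    show String.ofList (PySem.Chars.replace (String.ofList l).toList old.toList new.toList) = _
    rw [String.toList_ofList, hol, pvReplace_eq]
  · have hc : ¬ PySem.Str.isIn old (String.ofList l) = true := by
      simp [PySem.Str.isIn, hol, h]
    rw [if_neg hc]
    have hni : ¬ (o :: old') <:+: l := fun hi => h ((PySem.Chars.isIn_iff_infix (o :: old') l).mpr hi)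
    rw [pvRep_of_not_infix o old' new.toList l hni]

-- ===== VERDICT (by name: the statement is the Claim_ definition above) =====
theorem fomatage_carte_into_printable_spec : Claim_equal_fomatage_carte_into_printable := by
  intro carte _
  unfold Spec_fomatage_carte_into_printable
  simp only [fomatage_carte_into_printable, fomatage_carte_into_printable_alt, pvStepA, List.foldl]
  rw [show PySem.Str.lower carte = String.ofList (PySem.Chars.lower carte.toList) from rfl]
  rw [pvStr_guard "pc_" "peu courant - " 'p' ['c', '_'] (by decide)]
  rw [pvStr_guard "h_" "héroïque - " 'h' ['_'] (by decide)]
  rw [pvStr_guard "c_" "commun - " 'c' ['_'] (by decide)]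
  rw [pvStr_guard "r_" "rare - " 'r' ['_'] (by decide)]
  rw [pvStr_guard "e_" "épique - " 'e' ['_'] (by decide)]
  refine congrArg String.ofList ?_
  have h2 : (String.ofList (PySem.Chars.lower carte.toList)).toList
      = PySem.Chars.lower carte.toList := by simp
  rw [h2]
  exact pvChain_eq (PySem.Chars.lower carte.toList).length _ (le_refl _)
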